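-- pv_equiv track=rewrite | github.com/AcousticOdometry/AO | scripts/wheel_test_bed_dataset.py | _subset_samples
-- ===== SOURCE A (Python) =====
-- def _subset_samples(data, indices):
--     yielded = 0
--     for sample_n, sample in enumerate(data):
--         # Assumes indices are sorted
--         try:
--             if indices[yielded] == sample_n:
--                 yielded += 1
--                 yield sample
--         except IndexError:  # There is data but indices are finished
--             break
-- ===== SOURCE B (Python) =====
-- def _subset_samples(data, indices):
--     # Outer loop over indices with a cursor into data; stops as soon as an
--     # index can no longer be matched (already passed, negative, or past the end).
--     pos = 0
--     n = len(data)
--     for idx in indices: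
--         if pos <= idx < n:
--             yield data[idx]
--             pos = idx + 1
--         else:
--             break
-- ===== Notes on version B (the rewrite author's own statement) =====
-- stated objective: alternative
-- what changed: B loops over indices with a cursor and direct data[idx] access (breaking when an index is unmatchable) instead of A's scan over enumerate(data) with a pointer into indices.
import Mathlib
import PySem

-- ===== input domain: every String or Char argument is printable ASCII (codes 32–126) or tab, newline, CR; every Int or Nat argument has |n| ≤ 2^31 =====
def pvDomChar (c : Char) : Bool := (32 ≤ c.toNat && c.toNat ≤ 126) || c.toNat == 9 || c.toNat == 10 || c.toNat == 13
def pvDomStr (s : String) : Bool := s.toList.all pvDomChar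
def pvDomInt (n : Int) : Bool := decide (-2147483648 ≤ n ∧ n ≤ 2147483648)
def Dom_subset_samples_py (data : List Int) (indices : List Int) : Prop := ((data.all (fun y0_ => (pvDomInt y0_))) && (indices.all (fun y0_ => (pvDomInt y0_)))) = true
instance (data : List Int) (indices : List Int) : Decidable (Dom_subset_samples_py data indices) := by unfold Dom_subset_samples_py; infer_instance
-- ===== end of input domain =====

-- B iterates over `indices` with a cursor into `data` instead of scanning enumerate(data)
-- with a pointer into `indices`; same yielded values, proved equal for all inputs.

-- ===== PORT A =====
-- A's generator loop: for (sample_n, sample) in enumerate(data), try indices[yielded];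
-- IndexError (pyGet? = none) breaks; on a match advance `yielded` and yield the sample.
def aLoop (indices : List Int) : List (Int × Int) → Int → List Int → List Int
  | [], _, acc => acc.reverse
  | (n, s) :: rest, y, acc =>
    match PySem.List.pyGet? indices y with
    | none => acc.reverse
    | some v => if v = n then aLoop indices rest (y + 1) (s :: acc)
                else aLoop indices rest y acc

def subset_samples_py (data : List Int) (indices : List Int) : List Int :=
  aLoop indices (PySem.List.enumerate data 0) 0 []

-- ===== PORT B =====
-- B's loop: for idx in indices, if pos <= idx < len(data) yield data[idx] and set
-- pos = idx + 1, else break.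
def bLoop (data : List Int) : List Int → Int → List Int
  | [], _ => []
  | idx :: rest, pos =>
    if pos ≤ idx ∧ idx < (data.length : Int) then
      PySem.List.pyGetD data idx 0 :: bLoop data rest (idx + 1)
    else []

def subset_samples_py_alt (data : List Int) (indices : List Int) : List Int :=
  bLoop data indices 0

-- ===== PRECONDITION & SPEC =====
def Spec_subset_samples_py (data : List Int) (indices : List Int) (out : List Int) : Prop := out = subset_samples_py_alt data indices
instance (data : List Int) (indices : List Int) (out : List Int) : Decidable (Spec_subset_samples_py data indices out) := by unfold Spec_subset_samples_py; infer_instance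

-- ===== CLAIM (what is proved, stated in full; the proofs are below) =====
def Claim_equal_subset_samples_py : Prop := ∀ (data : List Int) (indices : List Int), Dom_subset_samples_py data indices → Spec_subset_samples_py data indices (subset_samples_py data indices)

-- ===== LEMMAS AND PROOFS =====

-- A's loop with the remaining indices held as a list instead of a pointer.
def aLoop' : List Int → List (Int × Int) → List Int → List Int
  | _, [], acc => acc.reverse
  | ys, (n, s) :: rest, acc =>
    match ys with
    | [] => acc.reverse
    | v :: ys' => if v = n then aLoop' ys' rest (s :: acc)
                  else aLoop' (v :: ys') rest acc

theorem aLoop_eq_aLoop' (indices : List Int) (pairs : List (Int × Int))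
    (y : Nat) (acc : List Int) :
    aLoop indices pairs (y : Int) acc = aLoop' (indices.drop y) pairs acc := by
  induction pairs generalizing y acc with
  | nil => simp [aLoop, aLoop']
  | cons p rest ih =>
    obtain ⟨n, s⟩ := p
    have hget : PySem.List.pyGet? indices (y : Int) = (indices.drop y).head? := by
      rw [PySem.List.pyGet?_natCast, ← List.head?_drop]
    rw [aLoop, hget]
    cases hd : indices.drop y with
    | nil => simp [aLoop']
    | cons v ys' =>
      have hdrop1 : indices.drop (y + 1) = ys' := by
        have h2 : List.drop 1 (List.drop y indices) = List.drop (y + 1) indices :=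
          List.drop_drop
        rw [← h2, hd]
        rfl
      simp only [List.head?_cons, aLoop']
      by_cases hv : v = n
      · rw [if_pos hv, if_pos hv,
          show (y : Int) + 1 = ((y + 1 : Nat) : Int) by push_cast; ring,
          ih (y + 1) (s :: acc), hdrop1]
      · rw [if_neg hv, if_neg hv, ← hd, ih y acc]

theorem aLoop'_past (v : Int) (ys : List Int) :
    ∀ (l : List Int) (n : Int) (acc : List Int), v < n →
      aLoop' (v :: ys) (PySem.List.enumerate l n) acc = acc.reverse := by
  intro l
  induction l with
  | nil => intro n acc _; simp [PySem.List.enumerate, aLoop']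
  | cons x xs ih =>
    intro n acc hv
    rw [PySem.List.enumerate_cons, aLoop', if_neg (by omega)]
    exact ih (n + 1) acc (by omega)

theorem aLoop'_eq_bLoop (data : List Int) :
    ∀ (d : List Int) (n : Nat) (ys acc : List Int), d = data.drop n →
      aLoop' ys (PySem.List.enumerate d (n : Int)) acc
        = acc.reverse ++ bLoop data ys (n : Int) := by
  intro d
  induction d with
  | nil =>
    intro n ys acc hd
    have hlen : data.length ≤ n := List.drop_eq_nil_iff.mp hd.symm
    cases ys with
    | nil => simp [PySem.List.enumerate, aLoop', bLoop]
    | cons v ys' =>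
      rw [PySem.List.enumerate_nil, aLoop', bLoop, if_neg (by omega)]
      simp
  | cons s rest ih =>
    intro n ys acc hd
    have hlen : n < data.length := by
      by_contra h
      rw [List.drop_eq_nil_iff.mpr (by omega)] at hd
      simp at hd
    have hrest : rest = data.drop (n + 1) := by
      have h2 : List.drop 1 (List.drop n data) = List.drop (n + 1) data :=
        List.drop_drop
      rw [← h2, ← hd]
      rfl
    have hs : data[n] = s := by
      have h1 : data[n]? = some s := by rw [← List.head?_drop, ← hd]; rfl
      rw [List.getElem?_eq_getElem hlen] at h1
      simpa using h1
    cases ys with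
    | nil => simp [PySem.List.enumerate_cons, aLoop', bLoop]
    | cons v ys' =>
      rw [PySem.List.enumerate_cons, aLoop']
      rcases eq_or_ne v (n : Int) with hv | hv
      · subst hv
        have hc : ((n : Int)) + 1 = ((n + 1 : Nat) : Int) := by push_cast; ring
        rw [if_pos rfl, hc, ih (n + 1) ys' (s :: acc) hrest]
        have hgetD : PySem.List.pyGetD data ((n : Nat) : Int) 0 = s := by
          rw [PySem.List.pyGetD_natCast]
          simp [List.getD_eq_getElem?_getD, List.getElem?_eq_getElem hlen, hs]
        have hguard : ((n : Int)) ≤ ((n : Int)) ∧ ((n : Int)) < (data.length : Int) := by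
          constructor
          · exact le_refl _
          · omega
        rw [bLoop, if_pos hguard, hgetD, hc]
        simp
      · rw [if_neg hv]
        rcases lt_or_gt_of_ne hv with hlt | hgt
        · rw [aLoop'_past v ys' rest ((n : Int) + 1) acc (by omega)]
          rw [bLoop, if_neg (by omega)]
          simp
        · rw [show (n : Int) + 1 = ((n + 1 : Nat) : Int) by push_cast; ring,
            ih (n + 1) (v :: ys') acc hrest]
          have heq : bLoop data (v :: ys') ((n + 1 : Nat) : Int)
              = bLoop data (v :: ys') (n : Int) := by
            rw [bLoop, bLoop]
            by_cases hle : v < (data.length : Int)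
            · rw [if_pos ⟨by push_cast; omega, hle⟩, if_pos ⟨by omega, hle⟩]
            · rw [if_neg (by tauto), if_neg (by tauto)]
          rw [heq]

-- ===== VERDICT (by name: the statement is the Claim_ definition above) =====
theorem subset_samples_py_spec : Claim_equal_subset_samples_py := by
  intro data indices _
  show subset_samples_py data indices = subset_samples_py_alt data indices
  unfold subset_samples_py subset_samples_py_alt
  have h0 : (0 : Int) = ((0 : Nat) : Int) := by norm_num
  rw [h0, aLoop_eq_aLoop' indices _ 0 [], List.drop_zero,
    aLoop'_eq_bLoop data data 0 indices [] (by simp)]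
  rfl
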